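-- pv_equiv track=rewrite | github.com/b-zhu524/usaco_practice | triangles/triangles.py | solve
-- ===== SOURCE A (Python) =====
-- from itertools import combinations
--
-- def x_parallel(c1, c2):
--     if c1[1] == c2[1]:
--         return True
--     return False
--
-- def y_parallel(c1, c2):
--     if c1[0] == c2[0]:
--         return True
--     return False
--
-- def area(c1, c2, c3):
--     l1 = abs(c2[0] - c1[0])
--     l2 = abs(c3[1] - c2[1])
--     return l2*l1
--
-- def solve(coords):
--     max_area = 0
--     for c1, c2, c3 in combinations(coords, 3):
--         if x_parallel(c1, c2):
--             if y_parallel(c2, c3):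
--                 curr_area = area(c1, c2, c3)
--             elif y_parallel(c1, c3):
--                 curr_area = area(c2, c1, c3)
--             else:
--                 continue
--
--         elif x_parallel(c2, c3):
--             if y_parallel(c1, c2):
--                 curr_area = area(c3, c2, c1)
--             elif y_parallel(c1, c3):
--                 curr_area = area(c2, c3, c1)
--             else:
--                 continue
--
--         elif x_parallel(c1, c3):
--             if y_parallel(c1, c2):
--                 curr_area = area(c3, c1, c2)
--             elif y_parallel(c2, c3):
--                 curr_area = area(c1, c3, c2)
--             else:
--                 continue
--
--         else:
--             continue
--
--         if curr_area > max_area: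
--             max_area = curr_area
--
--     return max_area
-- ===== SOURCE B (Python) =====
-- def solve(coords):
--     best = 0
--     for (x, y) in coords:
--         dx = max((abs(qx - x) for (qx, qy) in coords if qy == y), default=0)
--         dy = max((abs(qy - y) for (qx, qy) in coords if qx == x), default=0)
--         best = max(best, dx * dy)
--     return best
-- ===== Notes on version B (the rewrite author's own statement) =====
-- stated objective: faster
-- what changed: Replaces the O(n^3) scan over all point triples with a per-corner computation: for each point take the maximum horizontal leg among same-y points and the maximum vertical leg among same-x points and maximise their product.
import Mathlib
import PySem

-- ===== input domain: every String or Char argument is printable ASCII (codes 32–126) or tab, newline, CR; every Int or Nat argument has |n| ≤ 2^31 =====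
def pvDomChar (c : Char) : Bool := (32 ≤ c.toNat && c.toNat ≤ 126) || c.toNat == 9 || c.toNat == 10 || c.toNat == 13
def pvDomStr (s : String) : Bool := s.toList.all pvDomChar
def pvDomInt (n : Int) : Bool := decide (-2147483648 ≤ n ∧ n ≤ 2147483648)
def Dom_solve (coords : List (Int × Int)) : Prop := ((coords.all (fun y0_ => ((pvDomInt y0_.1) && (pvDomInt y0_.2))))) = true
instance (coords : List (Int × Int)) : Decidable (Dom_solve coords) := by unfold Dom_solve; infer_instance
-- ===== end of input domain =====

-- B replaces A's scan over all triples with a per-corner maximisation of the two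
-- leg lengths (max |dx| among same-y points, max |dy| among same-x points).

-- ===== PORT A =====
-- itertools.combinations(coords, 2) / (coords, 3) as index-ordered tuples
def comb2 {α : Type} : List α → List (α × α)
  | [] => []
  | x :: xs => xs.map (fun y => (x, y)) ++ comb2 xs

def comb3 {α : Type} : List α → List (α × α × α)
  | [] => []
  | x :: xs => (comb2 xs).map (fun bc => (x, bc.1, bc.2)) ++ comb3 xs

def x_parallel (c1 c2 : Int × Int) : Bool := if c1.2 = c2.2 then true else false
def y_parallel (c1 c2 : Int × Int) : Bool := if c1.1 = c2.1 then true else false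

-- Python: l1 = abs(c2[0]-c1[0]); l2 = abs(c3[1]-c2[1]); return l2*l1
def area (c1 c2 c3 : Int × Int) : Int := |c3.2 - c2.2| * |c2.1 - c1.1|

-- A's branch cascade: the chosen curr_area, or none for `continue`
def currA (c1 c2 c3 : Int × Int) : Option Int :=
    if x_parallel c1 c2 = true then
      if y_parallel c2 c3 = true then some (area c1 c2 c3)
      else if y_parallel c1 c3 = true then some (area c2 c1 c3)
      else none
    else if x_parallel c2 c3 = true then
      if y_parallel c1 c2 = true then some (area c3 c2 c1)
      else if y_parallel c1 c3 = true then some (area c2 c3 c1)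
      else none
    else if x_parallel c1 c3 = true then
      if y_parallel c1 c2 = true then some (area c3 c1 c2)
      else if y_parallel c2 c3 = true then some (area c1 c3 c2)
      else none
    else none

-- one iteration of A's loop: `continue`, or `if curr_area > max_area: ...`
def stepA (m : Int) (t : (Int × Int) × (Int × Int) × (Int × Int)) : Int :=
  match currA t.1 t.2.1 t.2.2 with
  | none => m
  | some a => if a > m then a else m

def solve (coords : List (Int × Int)) : Int :=
  (comb3 coords).foldl stepA 0

-- ===== PORT B =====
-- max(abs(qx-x) for same-y points, default=0) / max(abs(qy-y) for same-x points, default=0)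
def extX (coords : List (Int × Int)) (x y : Int) : Int :=
  ((coords.filter (fun q => q.2 = y)).map (fun q => |q.1 - x|)).foldl max 0

def extY (coords : List (Int × Int)) (x y : Int) : Int :=
  ((coords.filter (fun q => q.1 = x)).map (fun q => |q.2 - y|)).foldl max 0

def solve_alt (coords : List (Int × Int)) : Int :=
  coords.foldl (fun best p => max best (extX coords p.1 p.2 * extY coords p.1 p.2)) 0

-- ===== PRECONDITION & SPEC =====
def Spec_solve (coords : List (Int × Int)) (out : Int) : Prop := out = solve_alt coords
instance (coords : List (Int × Int)) (out : Int) : Decidable (Spec_solve coords out) := by unfold Spec_solve; infer_instance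

-- ===== CLAIM (what is proved, stated in full; the proofs are below) =====
def Claim_equal_solve : Prop := ∀ (coords : List (Int × Int)), Dom_solve coords → Spec_solve coords (solve coords)

-- ===== LEMMAS AND PROOFS =====

theorem x_parallel_iff (c1 c2 : Int × Int) : x_parallel c1 c2 = true ↔ c1.2 = c2.2 := by
  unfold x_parallel; split_ifs with h <;> simp [h]

theorem y_parallel_iff (c1 c2 : Int × Int) : y_parallel c1 c2 = true ↔ c1.1 = c2.1 := by
  unfold y_parallel; split_ifs with h <;> simp [h]

-- the value A's loop body contributes for one triple (the matched area, else 0)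
def valA (t : (Int × Int) × (Int × Int) × (Int × Int)) : Int := (currA t.1 t.2.1 t.2.2).getD 0

theorem stepA_eq_max (m : Int) (t : (Int × Int) × (Int × Int) × (Int × Int)) (hm : 0 ≤ m) :
    stepA m t = max m (valA t) := by
  unfold stepA valA
  cases currA t.1 t.2.1 t.2.2 with
  | none => simp; omega
  | some a => simp; omega

theorem le_foldl_max (l : List Int) (a : Int) : a ≤ l.foldl max a := by
  induction l generalizing a with
  | nil => exact le_rfl
  | cons x xs ih => exact le_trans (le_max_left a x) (ih _)

theorem mem_le_foldl_max (l : List Int) (a x : Int) (hx : x ∈ l) : x ≤ l.foldl max a := by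
  induction l generalizing a with
  | nil => cases hx
  | cons y ys ih =>
      rcases List.mem_cons.mp hx with h | h
      · subst h; exact le_trans (le_max_right a x) (le_foldl_max _ _)
      · exact ih _ h

theorem foldl_max_le (l : List Int) : ∀ a b : Int, (∀ x ∈ l, x ≤ b) → a ≤ b →
    l.foldl max a ≤ b := by
  induction l with
  | nil => intro a b _ ha; exact ha
  | cons x xs ih =>
      intro a b h ha
      exact ih _ _ (fun y hy => h y (List.mem_cons_of_mem _ hy))
        (max_le ha (h x List.mem_cons_self))

theorem foldl_max_attained (l : List Int) : ∀ a : Int,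
    l.foldl max a = a ∨ l.foldl max a ∈ l := by
  induction l with
  | nil => intro a; exact Or.inl rfl
  | cons x xs ih =>
      intro a
      simp only [List.foldl_cons]
      rcases ih (max a x) with h | h
      · rcases max_choice a x with hc | hc
        · exact Or.inl (by rw [h, hc])
        · exact Or.inr (by rw [h, hc]; exact List.mem_cons_self)
      · exact Or.inr (List.mem_cons_of_mem _ h)

theorem solve_as (coords : List (Int × Int)) :
    solve coords = ((comb3 coords).map valA).foldl max 0 := by
  rw [List.foldl_map]
  unfold solve
  have key : ∀ (l : List ((Int × Int) × (Int × Int) × (Int × Int))) (m : Int), 0 ≤ m →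
      l.foldl stepA m = l.foldl (fun m t => max m (valA t)) m := by
    intro l
    induction l with
    | nil => intro m _; rfl
    | cons t ts ih =>
        intro m hm
        simp only [List.foldl_cons]
        rw [stepA_eq_max m t hm]
        exact ih _ (le_trans hm (le_max_left _ _))
  exact key _ 0 le_rfl

theorem solve_alt_as (coords : List (Int × Int)) :
    solve_alt coords =
      (coords.map (fun p => extX coords p.1 p.2 * extY coords p.1 p.2)).foldl max 0 := by
  rw [List.foldl_map]; rfl

theorem extX_nonneg (coords : List (Int × Int)) (x y : Int) : 0 ≤ extX coords x y :=
  le_foldl_max _ _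

theorem extY_nonneg (coords : List (Int × Int)) (x y : Int) : 0 ≤ extY coords x y :=
  le_foldl_max _ _

theorem legX_le (coords : List (Int × Int)) (p c : Int × Int) (hc : c ∈ coords)
    (hy : c.2 = p.2) : |c.1 - p.1| ≤ extX coords p.1 p.2 := by
  apply mem_le_foldl_max
  exact List.mem_map_of_mem (List.mem_filter.mpr ⟨hc, by simp [hy]⟩)

theorem legY_le (coords : List (Int × Int)) (p c : Int × Int) (hc : c ∈ coords)
    (hx : c.1 = p.1) : |c.2 - p.2| ≤ extY coords p.1 p.2 := by
  apply mem_le_foldl_max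
  exact List.mem_map_of_mem (List.mem_filter.mpr ⟨hc, by simp [hx]⟩)

theorem corner_le (coords : List (Int × Int)) (p : Int × Int) (hp : p ∈ coords) :
    extX coords p.1 p.2 * extY coords p.1 p.2 ≤ solve_alt coords := by
  rw [solve_alt_as]
  exact mem_le_foldl_max _ _ _ (List.mem_map_of_mem hp)

theorem branch_le (coords : List (Int × Int)) (p q r : Int × Int)
    (hp : p ∈ coords) (hq : q ∈ coords) (hr : r ∈ coords)
    (hqy : q.2 = p.2) (hrx : r.1 = p.1) :
    |r.2 - p.2| * |p.1 - q.1| ≤ solve_alt coords := by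
  have h1 : |p.1 - q.1| ≤ extX coords p.1 p.2 := by
    rw [abs_sub_comm]; exact legX_le coords p q hq hqy
  have h2 : |r.2 - p.2| ≤ extY coords p.1 p.2 := legY_le coords p r hr hrx
  calc |r.2 - p.2| * |p.1 - q.1|
      ≤ extY coords p.1 p.2 * extX coords p.1 p.2 :=
        mul_le_mul h2 h1 (abs_nonneg _) (extY_nonneg _ _ _)
    _ = extX coords p.1 p.2 * extY coords p.1 p.2 := mul_comm _ _
    _ ≤ solve_alt coords := corner_le coords p hp

theorem mem_comb2 {α : Type} (l : List α) (a b : α)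
    (h : (a, b) ∈ comb2 l) : a ∈ l ∧ b ∈ l := by
  induction l with
  | nil => cases h
  | cons x xs ih =>
      simp only [comb2, List.mem_append, List.mem_map] at h
      rcases h with ⟨y, hy, heq⟩ | h
      · cases heq
        exact ⟨List.mem_cons_self, List.mem_cons_of_mem _ hy⟩
      · obtain ⟨h1, h2⟩ := ih h
        exact ⟨List.mem_cons_of_mem _ h1, List.mem_cons_of_mem _ h2⟩

theorem mem_comb3 {α : Type} (l : List α) (a b c : α)
    (h : (a, b, c) ∈ comb3 l) : a ∈ l ∧ b ∈ l ∧ c ∈ l := by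
  induction l with
  | nil => cases h
  | cons x xs ih =>
      simp only [comb3, List.mem_append, List.mem_map] at h
      rcases h with ⟨bc, hbc, heq⟩ | h
      · cases heq
        obtain ⟨h1, h2⟩ := mem_comb2 xs _ _ hbc
        exact ⟨List.mem_cons_self, List.mem_cons_of_mem _ h1, List.mem_cons_of_mem _ h2⟩
      · obtain ⟨h1, h2, h3⟩ := ih h
        exact ⟨List.mem_cons_of_mem _ h1, List.mem_cons_of_mem _ h2, List.mem_cons_of_mem _ h3⟩

theorem valA_le (coords : List (Int × Int)) (t : (Int × Int) × (Int × Int) × (Int × Int))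
    (ht : t ∈ comb3 coords) : valA t ≤ solve_alt coords := by
  obtain ⟨c1, c2, c3⟩ := t
  obtain ⟨h1, h2, h3⟩ := mem_comb3 coords c1 c2 c3 ht
  have hnn : (0 : Int) ≤ solve_alt coords := by
    rw [solve_alt_as]; exact le_foldl_max _ _
  unfold valA currA area
  simp only [x_parallel_iff, y_parallel_iff]
  split_ifs with b1 b2 b3 b4 b5 b6 b7 b8 b9 <;> simp only [Option.getD_some, Option.getD_none]
  · exact branch_le coords c2 c1 c3 h2 h1 h3 b1 b2.symm
  · exact branch_le coords c1 c2 c3 h1 h2 h3 b1.symm b3.symm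
  · exact hnn
  · exact branch_le coords c2 c3 c1 h2 h3 h1 b4.symm b5
  · exact branch_le coords c3 c2 c1 h3 h2 h1 b4 b6
  · exact hnn
  · exact branch_le coords c1 c3 c2 h1 h3 h2 b7.symm b8.symm
  · exact branch_le coords c3 c1 c2 h3 h1 h2 b7 b9
  · exact hnn
  · exact hnn

theorem solve_le (coords : List (Int × Int)) : solve coords ≤ solve_alt coords := by
  rw [solve_as]
  apply foldl_max_le
  · intro x hx
    obtain ⟨t, ht, rfl⟩ := List.mem_map.mp hx
    exact valA_le coords t ht
  · rw [solve_alt_as]; exact le_foldl_max _ _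

-- ===== the other direction =====

theorem sublist2_mem_comb2 {α : Type} (l : List α) (a b : α)
    (h : List.Sublist [a, b] l) : (a, b) ∈ comb2 l := by
  induction l with
  | nil => cases h
  | cons x xs ih =>
      cases h with
      | cons _ h' => exact List.mem_append_right _ (ih h')
      | cons₂ _ h' =>
          apply List.mem_append_left
          apply List.mem_map_of_mem
          exact h'.mem List.mem_cons_self

theorem sublist3_mem_comb3 {α : Type} (l : List α) (a b c : α)
    (h : List.Sublist [a, b, c] l) : (a, b, c) ∈ comb3 l := by
  induction l with
  | nil => cases h
  | cons x xs ih =>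
      cases h with
      | cons _ h' => exact List.mem_append_right _ (ih h')
      | cons₂ _ h' =>
          apply List.mem_append_left
          exact List.mem_map_of_mem (sublist2_mem_comb2 xs b c h')

theorem perm_pair {α : Type} (y z u v : α) (h : List.Perm [y, z] [u, v]) :
    (y = u ∧ z = v) ∨ (y = v ∧ z = u) := by
  have hy : y ∈ [u, v] := h.mem_iff.mp List.mem_cons_self
  rcases List.mem_cons.mp hy with h1 | h1
  · subst h1
    have h2 := h.cons_inv
    rw [List.perm_singleton] at h2
    cases h2
    exact Or.inl ⟨rfl, rfl⟩
  · have h1 : y = v := by simpa using h1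
    subst h1
    have hswap : List.Perm [u, y] [y, u] := List.Perm.swap y u []
    have h2 := (h.trans hswap).cons_inv
    rw [List.perm_singleton] at h2
    cases h2
    exact Or.inr ⟨rfl, rfl⟩

theorem perm3_cases {α : Type} (l : List α) (a b c : α) (h : List.Perm l [a, b, c]) :
    l = [a, b, c] ∨ l = [a, c, b] ∨ l = [b, a, c] ∨ l = [b, c, a] ∨
    l = [c, a, b] ∨ l = [c, b, a] := by
  have hlen : l.length = 3 := h.length_eq
  match l, hlen with
  | [x, y, z], _ =>
    have hx : x ∈ [a, b, c] := h.mem_iff.mp List.mem_cons_self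
    have step : ∀ u v w : α, List.Perm [a, b, c] (u :: [v, w]) → x = u →
        ([x, y, z] = [u, v, w] ∨ [x, y, z] = [u, w, v]) := by
      intro u v w hp hxu
      subst hxu
      have h2 : List.Perm [y, z] [v, w] := (h.trans hp).cons_inv
      rcases perm_pair y z v w h2 with ⟨hy, hz⟩ | ⟨hy, hz⟩
      · subst hy; subst hz; exact Or.inl rfl
      · subst hy; subst hz; exact Or.inr rfl
    rcases List.mem_cons.mp hx with h1 | h1
    · rcases step a b c (List.Perm.refl _) h1 with h' | h'
      · exact Or.inl h'
      · exact Or.inr (Or.inl h')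
    rcases List.mem_cons.mp h1 with h2 | h2
    · have hp : List.Perm [a, b, c] (b :: [a, c]) := List.Perm.swap b a [c]
      rcases step b a c hp h2 with h' | h'
      · exact Or.inr (Or.inr (Or.inl h'))
      · exact Or.inr (Or.inr (Or.inr (Or.inl h')))
    · have h2 : x = c := by simpa using h2
      have hp : List.Perm [a, b, c] (c :: [a, b]) :=
        ((List.Perm.swap c b []).cons a).trans (List.Perm.swap c a [b])
      rcases step c a b hp h2 with h' | h'
      · exact Or.inr (Or.inr (Or.inr (Or.inr (Or.inl h'))))
      · exact Or.inr (Or.inr (Or.inr (Or.inr (Or.inr h'))))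

-- on any of the six orderings of a corner configuration, A's branch cascade
-- computes exactly the product of the two legs at the corner p
theorem valA_config (p q r : Int × Int)
    (hqy : q.2 = p.2) (hrx : r.1 = p.1) (hq1 : q.1 ≠ p.1) (hr2 : r.2 ≠ p.2) :
    valA (p, q, r) = |r.2 - p.2| * |p.1 - q.1| ∧
    valA (p, r, q) = |r.2 - p.2| * |p.1 - q.1| ∧
    valA (q, p, r) = |r.2 - p.2| * |p.1 - q.1| ∧
    valA (q, r, p) = |r.2 - p.2| * |p.1 - q.1| ∧
    valA (r, p, q) = |r.2 - p.2| * |p.1 - q.1| ∧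
    valA (r, q, p) = |r.2 - p.2| * |p.1 - q.1| := by
  refine ⟨?_, ?_, ?_, ?_, ?_, ?_⟩ <;>
    · unfold valA currA area
      simp only [x_parallel_iff, y_parallel_iff]
      simp [hqy, hrx, hq1, hr2, Ne.symm hq1, Ne.symm hr2, abs_sub_comm]

theorem alt_le (coords : List (Int × Int)) : solve_alt coords ≤ solve coords := by
  have hnn : (0 : Int) ≤ solve coords := by rw [solve_as]; exact le_foldl_max _ _
  rw [solve_alt_as]
  apply foldl_max_le _ _ _ _ hnn
  intro v hv
  obtain ⟨p, hp, rfl⟩ := List.mem_map.mp hv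
  rcases eq_or_lt_of_le (extX_nonneg coords p.1 p.2) with hX | hX
  · rw [← hX, zero_mul]; exact hnn
  rcases eq_or_lt_of_le (extY_nonneg coords p.1 p.2) with hY | hY
  · rw [← hY, mul_zero]; exact hnn
  -- the positive extents are attained by actual points q (same row) and r (same column)
  obtain ⟨q, hq, hqy, hqv⟩ :
      ∃ q, q ∈ coords ∧ q.2 = p.2 ∧ |q.1 - p.1| = extX coords p.1 p.2 := by
    rcases foldl_max_attained
        ((coords.filter (fun q => q.2 = p.2)).map (fun q => |q.1 - p.1|)) 0 with h | h
    · exfalso; rw [extX] at hX; omega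
    · obtain ⟨q, hq, hval⟩ := List.mem_map.mp h
      obtain ⟨hq1, hq2⟩ := List.mem_filter.mp hq
      exact ⟨q, hq1, by simpa using hq2, hval⟩
  obtain ⟨r, hr, hrx, hrv⟩ :
      ∃ r, r ∈ coords ∧ r.1 = p.1 ∧ |r.2 - p.2| = extY coords p.1 p.2 := by
    rcases foldl_max_attained
        ((coords.filter (fun q => q.1 = p.1)).map (fun q => |q.2 - p.2|)) 0 with h | h
    · exfalso; rw [extY] at hY; omega
    · obtain ⟨r, hr', hval⟩ := List.mem_map.mp h
      obtain ⟨hr1, hr2⟩ := List.mem_filter.mp hr'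
      exact ⟨r, hr1, by simpa using hr2, hval⟩
  have hq1 : q.1 ≠ p.1 := by
    intro he; rw [he] at hqv; simp at hqv; omega
  have hr2 : r.2 ≠ p.2 := by
    intro he; rw [he] at hrv; simp at hrv; omega
  -- p, q, r are three distinct points of coords, so some ordering is a triple of comb3
  have hnodup : ([p, q, r] : List (Int × Int)).Nodup := by
    have hpq : p ≠ q := fun he => hq1 (by rw [he])
    have hpr : p ≠ r := fun he => hr2 (by rw [he])
    have hqr : q ≠ r := fun he => hr2 (by rw [← he, hqy])
    simp [hpq, hpr, hqr]
  have hsub : ([p, q, r] : List (Int × Int)) ⊆ coords := by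
    intro x hx
    rcases List.mem_cons.mp hx with h | hx
    · exact h ▸ hp
    rcases List.mem_cons.mp hx with h | hx
    · exact h ▸ hq
    · have hxr : x = r := by simpa using hx
      exact hxr ▸ hr
  obtain ⟨l', hperm, hsl⟩ := hnodup.subperm hsub
  obtain ⟨v1, v2, v3, v4, v5, v6⟩ := valA_config p q r hqy hrx hq1 hr2
  have key : ∃ t ∈ comb3 coords, valA t = |r.2 - p.2| * |p.1 - q.1| := by
    rcases perm3_cases l' p q r hperm with h | h | h | h | h | h <;> subst h
    · exact ⟨(p, q, r), sublist3_mem_comb3 _ _ _ _ hsl, v1⟩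
    · exact ⟨(p, r, q), sublist3_mem_comb3 _ _ _ _ hsl, v2⟩
    · exact ⟨(q, p, r), sublist3_mem_comb3 _ _ _ _ hsl, v3⟩
    · exact ⟨(q, r, p), sublist3_mem_comb3 _ _ _ _ hsl, v4⟩
    · exact ⟨(r, p, q), sublist3_mem_comb3 _ _ _ _ hsl, v5⟩
    · exact ⟨(r, q, p), sublist3_mem_comb3 _ _ _ _ hsl, v6⟩
  obtain ⟨t, ht, hval⟩ := key
  have hEq : extX coords p.1 p.2 * extY coords p.1 p.2 = valA t := by
    rw [hval, ← hqv, ← hrv, abs_sub_comm q.1 p.1, mul_comm]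
  rw [hEq, solve_as]
  exact mem_le_foldl_max _ _ _ (List.mem_map_of_mem ht)

-- ===== VERDICT (by name: the statement is the Claim_ definition above) =====
theorem solve_spec : Claim_equal_solve := by
  intro coords _
  unfold Spec_solve
  exact le_antisymm (solve_le coords) (alt_le coords)
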